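-- pv_equiv track=rewrite | github.com/lamia-lang/lamia | lamia/validation/validators/file_validators/file_structure/csv_structure_validator.py | _count_separators_outside_quotes
-- ===== SOURCE A (Python) =====
-- def _count_separators_outside_quotes(line: str, separator: str) -> int:
--     """Count separators that are not inside double quotes"""
--     count = 0
--     in_quotes = False
--     for char in line:
--         if char == '"':
--             in_quotes = not in_quotes
--         elif char == separator and not in_quotes:
--             count += 1
--     return count
-- ===== SOURCE B (Python) =====
-- def _count_separators_outside_quotes(line: str, separator: str) -> int:
--     """Count separators that are not inside double quotes.
--
--     Split on '"': even-indexed pieces are outside quotes, odd-indexed inside.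
--     Count separator characters only in the even-indexed pieces.
--     """
--     total = 0
--     for i, part in enumerate(line.split('"')):
--         if i % 2 == 0:
--             total += sum(1 for c in part if c == separator)
--     return total
-- ===== Notes on version B (the rewrite author's own statement) =====
-- stated objective: alternative
-- what changed: Replaces the in_quotes toggle state machine by splitting the line on '"' and counting separator characters only in the even-indexed (outside-quotes) segments.
import Mathlib
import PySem

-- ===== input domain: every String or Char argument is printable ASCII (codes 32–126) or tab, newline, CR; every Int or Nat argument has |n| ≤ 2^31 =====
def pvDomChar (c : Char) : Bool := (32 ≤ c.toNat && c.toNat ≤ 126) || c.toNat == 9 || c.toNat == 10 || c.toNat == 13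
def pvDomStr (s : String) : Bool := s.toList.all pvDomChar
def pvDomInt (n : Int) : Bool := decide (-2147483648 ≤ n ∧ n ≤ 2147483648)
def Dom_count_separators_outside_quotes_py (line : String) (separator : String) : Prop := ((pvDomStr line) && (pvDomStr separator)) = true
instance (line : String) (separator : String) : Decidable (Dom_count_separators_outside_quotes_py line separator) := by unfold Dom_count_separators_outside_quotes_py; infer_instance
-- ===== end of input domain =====

-- B replaces A's in_quotes toggle state machine by splitting the line on '"' and counting
-- separator characters only in the even-indexed (outside-quotes) segments; same cost,
-- different decomposition.

-- ===== PORT A =====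
-- A's loop: state (count, in_quotes); Python's 'char == separator' compares the 1-char
-- string with separator, rendered exactly as char-list equality [char] == separator.toList.
def count_separators_outside_quotes_py (line : String) (separator : String) : Int :=
  (line.toList.foldl
    (fun (st : Int × Bool) char =>
      if char = '"' then (st.1, !st.2)
      else if ([char] == separator.toList) && !st.2 then (st.1 + 1, st.2)
      else st)
    (0, false)).1

-- ===== PORT B =====
-- Source B: for i, part in enumerate(line.split('"')): if i % 2 == 0: total += sum(1 for c in part if c == separator)
-- (split sep '"' is nonempty, so Python's split never raises; .getD [] is unreachable)
def count_separators_outside_quotes_py_alt (line : String) (separator : String) : Int :=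
  (PySem.List.enumerate ((PySem.Str.split? line "\"").getD []) 0).foldl
    (fun (total : Int) (p : Int × String) =>
      if PySem.Int.mod p.1 2 = 0
      then total + ((p.2.toList.countP (fun c => [c] == separator.toList) : Nat) : Int)
      else total)
    0

-- ===== PRECONDITION & SPEC =====
def Spec_count_separators_outside_quotes_py (line : String) (separator : String) (out : Int) : Prop := out = count_separators_outside_quotes_py_alt line separator
instance (line : String) (separator : String) (out : Int) : Decidable (Spec_count_separators_outside_quotes_py line separator out) := by unfold Spec_count_separators_outside_quotes_py; infer_instance

-- ===== CLAIM (what is proved, stated in full; the proofs are below) =====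
def Claim_equal_count_separators_outside_quotes_py : Prop := ∀ (line : String) (separator : String), Dom_count_separators_outside_quotes_py line separator → Spec_count_separators_outside_quotes_py line separator (count_separators_outside_quotes_py line separator)

-- ===== LEMMAS AND PROOFS =====

-- number of separator characters in a segment
def pvCnt (sep : String) (p : List Char) : Int :=
  ((p.countP (fun c => [c] == sep.toList) : Nat) : Int)

-- split on '"' with an explicit current-segment accumulator (proof-side model of split)
def pvSplitAux (cs cur : List Char) : List (List Char) :=
  match cs with
  | [] => [cur.reverse]
  | c :: rest => if c = '"' then cur.reverse :: pvSplitAux rest [] else pvSplitAux rest (c :: cur)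

-- sum of g on alternating segments, starting with flag b
def pvParts {α : Type} (g : α → Int) (b : Bool) (ps : List α) : Int :=
  match ps with
  | [] => 0
  | p :: ps => (if b then g p else 0) + pvParts g (!b) ps

lemma pvParts_nil {α : Type} (g : α → Int) (b : Bool) : pvParts g b [] = 0 := rfl

lemma pvParts_cons {α : Type} (g : α → Int) (b : Bool) (p : α) (ps : List α) :
    pvParts g b (p :: ps) = (if b then g p else 0) + pvParts g (!b) ps := rfl

lemma pvCnt_nil (sep : String) : pvCnt sep [] = 0 := by simp [pvCnt]

lemma pvCnt_reverse (sep : String) (p : List Char) : pvCnt sep p.reverse = pvCnt sep p := by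
  simp [pvCnt]

lemma pv_go (l : List Char) : ∀ (fuel : Nat) (cur : List Char) (acc : List (List Char)),
    l.length ≤ fuel →
    PySem.Chars.splitOn.go ['"'] fuel l cur acc = acc.reverse ++ pvSplitAux l cur := by
  induction l with
  | nil =>
    intro fuel cur acc _
    cases fuel <;> simp [PySem.Chars.splitOn.go, pvSplitAux]
  | cons c rest ih =>
    intro fuel cur acc hle
    cases fuel with
    | zero => simp at hle
    | succ n =>
      by_cases hc : c = '"'
      · subst hc
        simp only [PySem.Chars.splitOn.go, List.isPrefixOf, BEq.rfl, Bool.true_and, if_pos,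
          List.drop_succ_cons, List.drop_zero, List.length_singleton]
        rw [ih n [] _ (by simpa using hle)]
        simp [pvSplitAux]
      · have hpre : (['"'].isPrefixOf (c :: rest)) = false := by
          simp [List.isPrefixOf]; exact fun h => hc h.symm
        simp only [PySem.Chars.splitOn.go, hpre, Bool.false_eq_true, if_false]
        rw [ih n (c :: cur) acc (by simpa using hle)]
        simp [pvSplitAux, hc]

lemma pv_splitOn (cs : List Char) :
    PySem.Chars.splitOn cs ['"'] = pvSplitAux cs [] := by
  unfold PySem.Chars.splitOn
  rw [pv_go cs (cs.length + 1) [] [] (by omega)]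
  simp

-- A's loop invariant: the running count plus the pending outside-quotes segment equals
-- the alternating-segment sum over the split-with-accumulator.
lemma pv_loopA (sep : String) (cs : List Char) : ∀ (cur : List Char) (count : Int) (inq : Bool),
    (cs.foldl
      (fun (st : Int × Bool) char =>
        if char = '"' then (st.1, !st.2)
        else if ([char] == sep.toList) && !st.2 then (st.1 + 1, st.2)
        else st)
      (count, inq)).1 + (if inq then 0 else pvCnt sep cur)
    = count + pvParts (pvCnt sep) (!inq) (pvSplitAux cs cur) := by
  induction cs with
  | nil =>
    intro cur count inq
    cases inq <;> simp [pvSplitAux, pvParts, pvCnt_reverse]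
  | cons c rest ih =>
    intro cur count inq
    by_cases hc : c = '"'
    · subst hc
      rw [List.foldl_cons, if_pos rfl, pvSplitAux, if_pos rfl, pvParts_cons]
      have h := ih [] count (!inq)
      rw [pvCnt_nil] at h
      cases inq <;> (simp [pvCnt_reverse] at h ⊢; omega)
    · have hm : pvCnt sep (c :: cur) =
          (if ([c] == sep.toList) then 1 else 0) + pvCnt sep cur := by
        by_cases h : ([c] == sep.toList) = true <;> (simp [pvCnt, h]; try omega)
      rw [List.foldl_cons, if_neg hc, pvSplitAux]
      rw [if_neg hc]
      by_cases hsep : ([c] == sep.toList) = true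
      · cases inq with
        | false =>
          have h := ih (c :: cur) (count + 1) false
          rw [hm] at h
          simp [hsep] at h ⊢
          omega
        | true =>
          have h := ih (c :: cur) count true
          simp [hsep] at h ⊢
          omega
      · have hsep' : ([c] == sep.toList) = false := by simpa using hsep
        cases inq with
        | false =>
          have h := ih (c :: cur) count false
          rw [hm] at h
          simp [hsep'] at h ⊢
          omega
        | true =>
          have h := ih (c :: cur) count true
          simp [hsep'] at h ⊢
          omega

lemma pvParts_map {α β : Type} (g : β → Int) (f : α → β) (ps : List α) :
    ∀ b, pvParts g b (ps.map f) = pvParts (fun a => g (f a)) b ps := by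
  induction ps with
  | nil => intro b; rfl
  | cons p ps ih => intro b; rw [List.map_cons, pvParts_cons, pvParts_cons, ih]

-- B's enumerate loop equals the alternating-segment sum (flag = evenness of the index).
lemma pv_enum {α : Type} (g : α → Int) (ps : List α) : ∀ (s t : Int), 0 ≤ s →
    (PySem.List.enumerate ps s).foldl
      (fun (total : Int) (p : Int × α) =>
        if PySem.Int.mod p.1 2 = 0 then total + g p.2 else total) t
    = t + pvParts g (decide (s % 2 = 0)) ps := by
  induction ps with
  | nil => intro s t _; simp [PySem.List.enumerate_nil, pvParts_nil]
  | cons p ps ih =>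
    intro s t hs
    rw [PySem.List.enumerate_cons, List.foldl_cons, ih (s + 1) _ (by omega), pvParts_cons]
    by_cases he : s % 2 = 0
    · have h1 : ¬ ((s + 1) % 2 = 0) := by omega
      simp [he, h1]; ring
    · have h1 : (s + 1) % 2 = 0 := by omega
      simp [he, h1]

-- ===== VERDICT (by name: the statement is the Claim_ definition above) =====
theorem count_separators_outside_quotes_py_spec : Claim_equal_count_separators_outside_quotes_py := by
  intro line sep _
  unfold Spec_count_separators_outside_quotes_py
  unfold count_separators_outside_quotes_py count_separators_outside_quotes_py_alt
  have hsplit : (PySem.Str.split? line "\"").getD []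
      = (PySem.Chars.splitOn line.toList ['"']).map String.ofList := by
    simp [PySem.Str.split?, PySem.Chars.split?]
  rw [hsplit,
    pv_enum (fun (p : String) => ((p.toList.countP (fun c => [c] == sep.toList) : Nat) : Int))
      _ 0 0 le_rfl,
    pvParts_map]
  have h := pv_loopA sep line.toList [] 0 false
  rw [pvCnt_nil] at h
  simp only [Bool.not_false, if_neg (Bool.false_ne_true), add_zero, zero_add] at h
  rw [pv_splitOn]
  have hfun : (fun a : List Char =>
      ((List.countP (fun c => [c] == sep.toList) (String.ofList a).toList : Nat) : Int))
        = pvCnt sep := funext fun a => by simp [pvCnt]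
  rw [hfun, zero_add, show (decide ((0 : Int) % 2 = 0)) = true by decide]
  exact h
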